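-- pv_equiv track=rewrite | github.com/Babdus/Protolanguage | Code/data_collection/eliminate_matrix.py | find_minimal_vertices
-- ===== SOURCE A (Python) =====
-- def find_minimal_vertices(vs):
--     min = 1000000
--     argmins = []
--     for key in vs:
--         n = len(vs[key])
--         if n < min:
--             min = n
--             argmins = [key]
--         elif n == min:
--             argmins.append(key)
--     return argmins, min
-- ===== SOURCE B (Python) =====
-- def find_minimal_vertices(vs):
--     best = 1000000
--     for key in vs:
--         if len(vs[key]) < best:
--             best = len(vs[key])
--     argmins = [key for key in vs if len(vs[key]) == best]
--     return argmins, best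
-- ===== Notes on version B (the rewrite author's own statement) =====
-- stated objective: simpler
-- what changed: Replaces the single-pass fold that maintains both the running minimum and the argmin list (with resets) by two passes: first find the minimal length, then collect the keys attaining it with a comprehension.
import Mathlib
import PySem

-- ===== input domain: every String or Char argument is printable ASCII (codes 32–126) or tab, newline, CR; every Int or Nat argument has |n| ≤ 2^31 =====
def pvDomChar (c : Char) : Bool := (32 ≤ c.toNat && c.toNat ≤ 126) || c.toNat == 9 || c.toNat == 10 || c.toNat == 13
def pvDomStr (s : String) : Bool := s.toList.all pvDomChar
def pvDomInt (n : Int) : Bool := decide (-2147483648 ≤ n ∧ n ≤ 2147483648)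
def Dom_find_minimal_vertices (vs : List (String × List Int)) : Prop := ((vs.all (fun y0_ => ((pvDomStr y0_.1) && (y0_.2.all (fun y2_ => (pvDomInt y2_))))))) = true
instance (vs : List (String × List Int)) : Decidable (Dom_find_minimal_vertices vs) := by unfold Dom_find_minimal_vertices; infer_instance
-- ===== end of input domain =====

-- B replaces A's single pass that maintains both the running minimum and the argmin list
-- (resetting the list on each improvement) by two simple passes: find the minimal length,
-- then collect the keys attaining it.  Objective: simpler.

-- ===== PORT A =====
-- one loop step of A: state is (min, argmins)
def fmvStepA (st : Int × List String) (p : String × List Int) : Int × List String :=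
  let n : Int := (p.2.length : Int)
  if n < st.1 then (n, [p.1])
  else if n = st.1 then (st.1, st.2 ++ [p.1])
  else st

def find_minimal_vertices (vs : List (String × List Int)) : List String × Int :=
  let st := vs.foldl fmvStepA (1000000, [])
  (st.2, st.1)

-- ===== PORT B =====
-- first pass of B: track only the minimal length
def fmvBest (vs : List (String × List Int)) (best : Int) : Int :=
  vs.foldl (fun b p => if (p.2.length : Int) < b then (p.2.length : Int) else b) best

def find_minimal_vertices_alt (vs : List (String × List Int)) : List String × Int :=
  let best := fmvBest vs 1000000
  (vs.filterMap (fun p => if (p.2.length : Int) = best then some p.1 else none), best)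

-- ===== PRECONDITION & SPEC =====
def Spec_find_minimal_vertices (vs : List (String × List Int)) (out : List String × Int) : Prop := out = find_minimal_vertices_alt vs
instance (vs : List (String × List Int)) (out : List String × Int) : Decidable (Spec_find_minimal_vertices vs out) := by unfold Spec_find_minimal_vertices; infer_instance

-- ===== CLAIM (what is proved, stated in full; the proofs are below) =====
def Claim_equal_find_minimal_vertices : Prop := ∀ (vs : List (String × List Int)), Dom_find_minimal_vertices vs → Spec_find_minimal_vertices vs (find_minimal_vertices vs)

-- ===== LEMMAS AND PROOFS =====

lemma fmvBest_le (vs : List (String × List Int)) (m : Int) : fmvBest vs m ≤ m := by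
  induction vs generalizing m with
  | nil => simp [fmvBest]
  | cons p rest ih =>
    simp only [fmvBest, List.foldl_cons]
    split
    · exact le_trans (ih _) (le_of_lt (by assumption))
    · exact ih _

lemma fmvFold_eq (vs : List (String × List Int)) (m : Int) (acc : List String) :
    vs.foldl fmvStepA (m, acc) =
      (fmvBest vs m,
       (if fmvBest vs m < m then [] else acc) ++
         vs.filterMap (fun p => if (p.2.length : Int) = fmvBest vs m then some p.1 else none)) := by
  induction vs generalizing m acc with
  | nil => simp [fmvBest]
  | cons p rest ih =>
    have hb : fmvBest (p :: rest) m
        = fmvBest rest (if (p.2.length : Int) < m then (p.2.length : Int) else m) := by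
      simp [fmvBest]
    by_cases h1 : (p.2.length : Int) < m
    · -- improvement branch
      have hb' : fmvBest (p :: rest) m = fmvBest rest (p.2.length : Int) := by
        simpa [h1] using hb
      have hle : fmvBest rest (p.2.length : Int) ≤ (p.2.length : Int) := fmvBest_le _ _
      have hlt : fmvBest (p :: rest) m < m := by rw [hb']; exact lt_of_le_of_lt hle h1
      simp only [List.foldl_cons, fmvStepA, h1, if_pos, ih]
      rw [hb']
      by_cases h2 : fmvBest rest (p.2.length : Int) < (p.2.length : Int)
      · simp [h2, ne_of_gt h2]
        have := hb' ▸ hlt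
        intro hc; exact absurd hc (not_le.mpr this)
      · have he : fmvBest rest (p.2.length : Int) = (p.2.length : Int) := le_antisymm hle (not_lt.mp h2)
        simp [he]
        intro hc; exact absurd hc (not_le.mpr h1)
    · by_cases h2 : (p.2.length : Int) = m
      · -- append branch
        have hb' : fmvBest (p :: rest) m = fmvBest rest m := by simpa [h1] using hb
        have hle : fmvBest rest m ≤ m := fmvBest_le _ _
        simp only [List.foldl_cons, fmvStepA, h2, if_pos, ih]
        rw [hb']
        by_cases h3 : fmvBest rest m < m
        · have : (p.2.length : Int) ≠ fmvBest rest m := by rw [h2]; exact ne_of_gt h3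
          simp [h3, this]
        · have he : fmvBest rest m = m := le_antisymm hle (not_lt.mp h3)
          simp [h2, he]
      · -- skip branch
        have h4 : m < (p.2.length : Int) := lt_of_le_of_ne (not_lt.mp h1) (Ne.symm h2)
        have hb' : fmvBest (p :: rest) m = fmvBest rest m := by simpa [h1] using hb
        have hle : fmvBest rest m ≤ m := fmvBest_le _ _
        have hne : (p.2.length : Int) ≠ fmvBest rest m := ne_of_gt (lt_of_le_of_lt hle h4)
        simp only [List.foldl_cons, fmvStepA, h1, h2, ih]
        rw [hb']
        simp [hne]

-- ===== VERDICT (by name: the statement is the Claim_ definition above) =====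
theorem find_minimal_vertices_spec : Claim_equal_find_minimal_vertices := by
  intro vs _
  unfold Spec_find_minimal_vertices find_minimal_vertices find_minimal_vertices_alt
  rw [fmvFold_eq]
  by_cases h : fmvBest vs 1000000 < 1000000 <;> simp [h]
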